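-- pv_equiv track=rewrite | github.com/NaayoungKwon/AlgorithmStudy | 백준/Gold/13164. 행복 유치원/행복 유치원.py | solution
-- ===== SOURCE A (Python) =====
-- import heapq
--
-- def calCost(kids, arr):
--     result = 0;
--     prevIdx = 0;
--     arr.sort();
--
--     for i in arr + [ len(kids) -1 ]:
--         result += (kids[i] - kids[prevIdx]);
--         prevIdx = i+1;
--     return result;
--
-- def solution(n, k, kids):
--
--     result = [];
--     dif = [];
--     for i in range(n-1):
--         heapq.heappush(dif, (-(kids[i+1] - kids[i]), i));
--
--     maxIdxList = [];
--     for i in range(k-1):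
--         m, idx = heapq.heappop(dif);
--         maxIdxList.append(idx);
--
--     return calCost(kids, maxIdxList);
-- ===== SOURCE B (Python) =====
-- def solution(n, k, kids):
--     gaps = sorted(kids[i + 1] - kids[i] for i in range(n - 1))
--     cut = max(k - 1, 0)
--     return kids[len(kids) - 1] - kids[0] - sum(gaps[len(gaps) - cut:])
-- ===== Notes on version B (the rewrite author's own statement) =====
-- stated objective: faster
-- what changed: Replaces the heap of negated gaps plus the index-sorting telescoping calCost pass by the closed form: answer = kids[-1] - kids[0] - sum of the k-1 largest adjacent gaps, taken from one sorted gap list.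
import Mathlib
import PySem

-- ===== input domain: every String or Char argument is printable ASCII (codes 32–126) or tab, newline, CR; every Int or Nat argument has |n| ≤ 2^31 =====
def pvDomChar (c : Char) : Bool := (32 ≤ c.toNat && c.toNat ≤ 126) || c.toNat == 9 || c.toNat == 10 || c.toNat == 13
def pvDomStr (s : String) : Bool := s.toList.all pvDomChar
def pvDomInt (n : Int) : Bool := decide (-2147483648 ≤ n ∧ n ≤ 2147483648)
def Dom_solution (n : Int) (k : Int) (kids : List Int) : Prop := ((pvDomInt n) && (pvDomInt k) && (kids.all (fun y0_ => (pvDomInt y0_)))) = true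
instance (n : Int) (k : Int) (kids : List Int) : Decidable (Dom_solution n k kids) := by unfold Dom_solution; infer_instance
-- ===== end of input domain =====

-- B replaces A's heap of negated gaps + telescoping calCost pass by the closed form
-- span minus the sum of the k-1 largest adjacent gaps, read off one sorted gap list.

-- ===== PORT A =====
-- Python tuple comparison (a, b) < (c, d) on Int pairs (lexicographic)
def lexLt (a b : Int × Int) : Bool := a.1 < b.1 || (a.1 == b.1 && a.2 < b.2)

-- heapq.heappop modelled by its contract: remove and return the smallest element
-- (first occurrence; in A all heap elements are distinct pairs, so this is exact)
def popMin (l : List (Int × Int)) : Option ((Int × Int) × List (Int × Int)) :=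
  match l with
  | [] => none
  | x :: xs =>
      let m := xs.foldl (fun a b => if lexLt b a then b else a) x
      some (m, (x :: xs).erase m)

def calCost (kids : List Int) (arr : List Int) : Int :=
  -- arr.sort(); then for i in arr + [len(kids)-1]: result += kids[i] - kids[prevIdx]; prevIdx = i+1
  let arr' := PySem.List.sorted arr (fun x => x) false
  (List.foldl
    (fun (st : Int × Int) i =>
      (st.1 + (PySem.List.pyGetD kids i 0 - PySem.List.pyGetD kids st.2 0), i + 1))
    (0, 0) (arr' ++ [(kids.length : Int) - 1])).1

def solution (n : Int) (k : Int) (kids : List Int) : Int :=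
  -- for i in range(n-1): heappush(dif, (-(kids[i+1]-kids[i]), i))
  let dif := (PySem.List.pyRange 0 (n - 1) 1).foldl
    (fun d i => d ++ [(-(PySem.List.pyGetD kids (i + 1) 0 - PySem.List.pyGetD kids i 0), i)]) []
  -- for i in range(k-1): m, idx = heappop(dif); maxIdxList.append(idx)   (pop of [] raises: outside Pre_)
  let st := (PySem.List.pyRange 0 (k - 1) 1).foldl
    (fun (st : List (Int × Int) × List Int) _ =>
      match popMin st.1 with
      | some (p, rest) => (rest, st.2 ++ [p.2])
      | none => st)
    (dif, [])
  calCost kids st.2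

-- ===== PORT B =====
def solution_alt (n : Int) (k : Int) (kids : List Int) : Int :=
  let gaps := PySem.List.sorted
    ((PySem.List.pyRange 0 (n - 1) 1).map
      (fun i => PySem.List.pyGetD kids (i + 1) 0 - PySem.List.pyGetD kids i 0))
    (fun x => x) false
  let cut := max (k - 1) 0
  PySem.List.pyGetD kids ((kids.length : Int) - 1) 0 - PySem.List.pyGetD kids 0 0 -
    (PySem.List.slice gaps (some ((gaps.length : Int) - cut)) none).sum

-- ===== PRECONDITION & SPEC =====
-- exactly the inputs on which A returns: nonempty kids (kids[-1]), all gap indices exist,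
-- and at most n-1 heap pops
def Pre_solution (n : Int) (k : Int) (kids : List Int) : Prop :=
  kids ≠ [] ∧ n ≤ (kids.length : Int) ∧ k - 1 ≤ max (n - 1) 0
instance (n : Int) (k : Int) (kids : List Int) : Decidable (Pre_solution n k kids) := by
  unfold Pre_solution; infer_instance

def pvWitness_solution : Int × Int × List Int := (3, 2, [1, 3, 6])

def Spec_solution (n : Int) (k : Int) (kids : List Int) (out : Int) : Prop := out = solution_alt n k kids
instance (n : Int) (k : Int) (kids : List Int) (out : Int) : Decidable (Spec_solution n k kids out) := by
  unfold Spec_solution; infer_instance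

-- ===== CLAIM (what is proved, stated in full; the proofs are below) =====
def Claim_equal_solution : Prop := ∀ (n : Int) (k : Int) (kids : List Int), Dom_solution n k kids → Pre_solution n k kids → Spec_solution n k kids (solution n k kids)

-- ===== LEMMAS AND PROOFS =====

theorem lexLt_irrefl (a : Int × Int) : lexLt a a = false := by
  simp [lexLt]

theorem lexLt_trans {a b c : Int × Int} (h1 : lexLt a b = true) (h2 : lexLt b c = true) :
    lexLt a c = true := by
  simp [lexLt] at *; omega

theorem lexLt_total {a b : Int × Int} (hne : a ≠ b) (h : lexLt a b = false) :
    lexLt b a = true := by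
  simp [lexLt, Prod.ext_iff] at *; omega

-- insertion sort by lexLt (proof-side witness of a sorted arrangement)
def insLex (x : Int × Int) : List (Int × Int) → List (Int × Int)
  | [] => [x]
  | y :: t => if lexLt x y then x :: y :: t else y :: insLex x t

def sortLex : List (Int × Int) → List (Int × Int)
  | [] => []
  | x :: t => insLex x (sortLex t)

theorem perm_insLex (x : Int × Int) (l : List (Int × Int)) : (insLex x l).Perm (x :: l) := by
  induction l with
  | nil => simp [insLex]
  | cons y t ih =>
      simp only [insLex]
      split
      · rfl
      · exact ((ih.cons y).trans (List.Perm.swap x y t))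

theorem perm_sortLex (l : List (Int × Int)) : (sortLex l).Perm l := by
  induction l with
  | nil => rfl
  | cons x t ih => exact (perm_insLex x (sortLex t)).trans (ih.cons x)

theorem pairwise_insLex (x : Int × Int) (l : List (Int × Int))
    (h : l.Pairwise (fun a b => lexLt b a = false)) :
    (insLex x l).Pairwise (fun a b => lexLt b a = false) := by
  induction l with
  | nil => simp [insLex]
  | cons y t ih =>
      simp only [insLex]
      rcases List.pairwise_cons.mp h with ⟨hy, ht⟩
      split
      · rename_i hxy
        refine List.pairwise_cons.mpr ⟨?_, h⟩
        intro z hz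
        rcases List.mem_cons.mp hz with rfl | hzt
        · cases hyx : lexLt z x
          · rfl
          · exact absurd (lexLt_trans hyx hxy) (by simp [lexLt_irrefl])
        · cases hzx : lexLt z x
          · rfl
          · exact absurd (lexLt_trans hzx hxy) (by simpa using hy z hzt)
      · rename_i hxy
        refine List.pairwise_cons.mpr ⟨?_, ih ht⟩
        intro z hz
        have : z = x ∨ z ∈ t := by
          have := (perm_insLex x t).mem_iff.mp hz
          simpa using this
        rcases this with rfl | hzt
        · simpa using hxy
        · exact hy z hzt

theorem pairwise_sortLex (l : List (Int × Int)) :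
    (sortLex l).Pairwise (fun a b => lexLt b a = false) := by
  induction l with
  | nil => simp [sortLex]
  | cons x t ih => exact pairwise_insLex x (sortLex t) ih

-- the foldl inside popMin returns an element of the scanned list (or the seed)
theorem foldl_min_mem (l : List (Int × Int)) (a : Int × Int) :
    l.foldl (fun a b => if lexLt b a then b else a) a = a ∨
      l.foldl (fun a b => if lexLt b a then b else a) a ∈ l := by
  induction l generalizing a with
  | nil => exact Or.inl rfl
  | cons b t ih =>
      simp only [List.foldl_cons]
      rcases ih (if lexLt b a then b else a) with h | h
      · rw [h]
        by_cases hba : lexLt b a = true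
        · rw [if_pos hba]; exact Or.inr (by simp)
        · rw [if_neg hba]; exact Or.inl rfl
      · exact Or.inr (List.mem_cons_of_mem b h)

-- … and that element is minimal for lexLt
theorem foldl_min_min (l : List (Int × Int)) :
    ∀ (a y : Int × Int), y = a ∨ y ∈ l →
      lexLt y (l.foldl (fun a b => if lexLt b a then b else a) a) = false := by
  induction l with
  | nil =>
      intro a y hy
      rcases hy with rfl | hy
      · exact lexLt_irrefl y
      · simp at hy
  | cons b t ih =>
      intro a y hy
      simp only [List.foldl_cons]
      by_cases hba : lexLt b a = true
      · rw [if_pos hba]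
        rcases hy with h | hy'
        · rw [h]
          have hb := ih b b (Or.inl rfl)
          cases hym : lexLt a (t.foldl (fun a b => if lexLt b a then b else a) b)
          · rfl
          · exact absurd (lexLt_trans hba hym) (by simp [hb])
        · rcases List.mem_cons.mp hy' with h | hyt
          · rw [h]; exact ih b b (Or.inl rfl)
          · exact ih b y (Or.inr hyt)
      · rw [if_neg hba]
        have hfalse : lexLt b a = false := by revert hba; cases lexLt b a <;> simp
        rcases hy with h | hy'
        · rw [h]; exact ih a a (Or.inl rfl)
        · rcases List.mem_cons.mp hy' with h | hyt
          · rw [h]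
            by_cases hab : b = a
            · rw [hab]; exact ih a a (Or.inl rfl)
            · have hab' : lexLt a b = true := lexLt_total hab hfalse
              have ham := ih a a (Or.inl rfl)
              cases hbm : lexLt b (t.foldl (fun a b => if lexLt b a then b else a) a)
              · rfl
              · exact absurd (lexLt_trans hab' hbm) (by simp [ham])
          · exact ih a y (Or.inr hyt)

theorem popMin_spec (d : List (Int × Int)) (x : Int × Int) (t : List (Int × Int))
    (hperm : d.Perm (x :: t))
    (hpair : (x :: t).Pairwise (fun a b => lexLt b a = false)) :
    ∃ d', popMin d = some (x, d') ∧ d'.Perm t := by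
  match d, hperm with
  | [], hperm => exact absurd hperm.length_eq (by simp)
  | a :: as, hperm =>
    simp only [popMin]
    set m := as.foldl (fun a b => if lexLt b a then b else a) a with hm
    have hmind : m ∈ a :: as := by
      rcases foldl_min_mem as a with h | h
      · rw [← hm] at h; rw [h]; simp
      · exact List.mem_cons_of_mem a (hm ▸ h)
    have hmx : m = x := by
      by_contra hne
      have hmxt : m ∈ t := by
        rcases List.mem_cons.mp (hperm.mem_iff.mp hmind) with h | h
        · exact absurd h hne
        · exact h
      have h1 : lexLt m x = false := (List.pairwise_cons.mp hpair).1 m hmxt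
      have h2 : lexLt x m = true := lexLt_total hne h1
      have hx : x ∈ a :: as := hperm.mem_iff.mpr (by simp)
      have := foldl_min_min as a x (List.mem_cons.mp hx)
      rw [← hm] at this
      rw [this] at h2; exact Bool.noConfusion h2
    refine ⟨(a :: as).erase x, ?_, ?_⟩
    · rw [hmx]
    · have := hperm.erase x
      rwa [List.erase_cons_head] at this

-- the pop loop: popping |r| times from a permutation of a sorted, duplicate-free list
-- appends exactly the second components of its first |r| elements
theorem popLoop (r : List Int) (s d : List (Int × Int)) (acc : List Int)
    (hperm : d.Perm s) (hpair : s.Pairwise (fun a b => lexLt b a = false))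
    (hlen : r.length ≤ s.length) :
    (r.foldl
      (fun (st : List (Int × Int) × List Int) _ =>
        match popMin st.1 with
        | some (p, rest) => (rest, st.2 ++ [p.2])
        | none => st)
      (d, acc)).2 = acc ++ (s.take r.length).map Prod.snd := by
  induction r generalizing s d acc with
  | nil => simp
  | cons i r' ih =>
      match s, hpair, hperm, hlen with
      | x :: t, hpair, hperm, hlen =>
        rcases popMin_spec d x t hperm hpair with ⟨d', hpop, hperm'⟩
        simp only [List.foldl_cons, hpop]
        rw [ih t d' (acc ++ [x.2]) hperm' (List.pairwise_cons.mp hpair).2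
          (by simpa using hlen)]
        simp [List.take_succ_cons]

-- telescoping of calCost's loop
theorem tele (kids : List Int) (L : Int) (l : List Int) (acc p : Int) :
    ((l ++ [L]).foldl
      (fun (st : Int × Int) i =>
        (st.1 + (PySem.List.pyGetD kids i 0 - PySem.List.pyGetD kids st.2 0), i + 1))
      (acc, p)).1 =
    acc + PySem.List.pyGetD kids L 0 - PySem.List.pyGetD kids p 0 -
      (l.map (fun i => PySem.List.pyGetD kids (i + 1) 0 - PySem.List.pyGetD kids i 0)).sum := by
  induction l generalizing acc p with
  | nil => simp; ring
  | cons i t ih =>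
      simp only [List.cons_append, List.foldl_cons, List.map_cons, List.sum_cons]
      rw [ih]
      ring

theorem calCost_eq (kids : List Int) (arr : List Int) :
    calCost kids arr =
      PySem.List.pyGetD kids ((kids.length : Int) - 1) 0 - PySem.List.pyGetD kids 0 0 -
        (arr.map (fun i => PySem.List.pyGetD kids (i + 1) 0 - PySem.List.pyGetD kids i 0)).sum := by
  unfold calCost
  rw [tele]
  have hp : (PySem.List.sorted arr (fun x => x) false).Perm arr := PySem.List.sorted_perm _ _ _
  rw [(hp.map _).sum_eq]
  ring

theorem solution_eq (n k : Int) (kids : List Int) (hpre : Pre_solution n k kids) :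
    solution n k kids = solution_alt n k kids := by
  obtain ⟨-, -, hk⟩ := hpre
  -- abbreviations
  set f : Int → Int := fun i => PySem.List.pyGetD kids (i + 1) 0 - PySem.List.pyGetD kids i 0 with hf
  set idxs := PySem.List.pyRange 0 (n - 1) 1 with hidxs
  set P : List (Int × Int) := idxs.map (fun i => (-(f i), i)) with hP
  set s := sortLex P with hs
  have hsp : s.Perm P := perm_sortLex P
  have hspair := pairwise_sortLex P
  have hslen : s.length = (n - 1).toNat := by
    rw [hsp.length_eq, hP, List.length_map, hidxs, PySem.List.length_pyRange_one]
    simp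
  have hc : (PySem.List.pyRange 0 (k - 1) 1).length = (k - 1).toNat := by
    rw [PySem.List.length_pyRange_one]; simp
  have hcle : (k - 1).toNat ≤ s.length := by rw [hslen]; omega
  -- A's side
  have hA : solution n k kids =
      PySem.List.pyGetD kids ((kids.length : Int) - 1) 0 - PySem.List.pyGetD kids 0 0 -
        (((s.take (k - 1).toNat).map Prod.snd).map f).sum := by
    show calCost kids
        ((PySem.List.pyRange 0 (k - 1) 1).foldl
          (fun (st : List (Int × Int) × List Int) _ =>
            match popMin st.1 with
            | some (p, rest) => (rest, st.2 ++ [p.2])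
            | none => st)
          ((PySem.List.pyRange 0 (n - 1) 1).foldl
            (fun d i =>
              d ++ [(-(PySem.List.pyGetD kids (i + 1) 0 - PySem.List.pyGetD kids i 0), i)]) [],
            [])).2 = _
    rw [PySem.List.foldl_append_singleton_eq_map, List.nil_append]
    rw [popLoop _ s _ [] (hsp.symm) hspair (by rw [hc]; exact hcle)]
    rw [hc, List.nil_append, calCost_eq]
  rw [hA]
  -- each popped index's gap is minus the pair's first component
  have hmapf : ((s.take (k - 1).toNat).map Prod.snd).map f =
      (s.take (k - 1).toNat).map (fun p => -p.1) := by
    rw [List.map_map]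
    refine List.map_congr_left ?_
    intro p hp
    have hpP : p ∈ P := hsp.mem_iff.mp (List.mem_of_mem_take hp)
    rcases List.mem_map.mp hpP with ⟨i, -, rfl⟩
    simp
  rw [hmapf, List.map_take]
  -- B's side
  set Y := s.map (fun p => -p.1) with hY
  have hYperm : Y.reverse.Perm (idxs.map f) := by
    refine (List.reverse_perm Y).trans ?_
    have h1 := hsp.map (fun p : Int × Int => -p.1)
    have h2 : P.map (fun p : Int × Int => -p.1) = idxs.map f := by
      rw [hP, List.map_map]; simp
    exact h2 ▸ h1
  have hspair' : s.Pairwise (fun a b : Int × Int => a.1 ≤ b.1) := by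
    refine hspair.imp ?_
    intro a b h
    by_contra hlt
    rw [not_le] at hlt
    have hba : lexLt b a = true := by simp [lexLt]; omega
    rw [hba] at h; exact Bool.noConfusion h
  have hYpair : Y.reverse.Pairwise (· ≤ ·) := by
    rw [List.pairwise_reverse, hY, List.pairwise_map]
    refine hspair'.imp ?_
    intro a b h
    omega
  have hsorted : PySem.List.sorted (idxs.map f) (fun x => x) false = Y.reverse :=
    PySem.List.sorted_id_eq_of_perm_of_pairwise _ _ hYperm hYpair
  have hB : solution_alt n k kids =
      PySem.List.pyGetD kids ((kids.length : Int) - 1) 0 - PySem.List.pyGetD kids 0 0 -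
        (PySem.List.slice (PySem.List.sorted (idxs.map f) (fun x => x) false)
          (some (((PySem.List.sorted (idxs.map f) (fun x => x) false).length : Int) - max (k - 1) 0))
          none).sum := rfl
  rw [hB, hsorted]
  have hYlen : Y.length = (n - 1).toNat := by rw [hY, List.length_map, hslen]
  have hge : (0:Int) ≤ (Y.reverse.length : Int) - max (k - 1) 0 := by
    rw [List.length_reverse, hYlen]; omega
  rw [PySem.List.slice_from _ hge]
  have htoNat : (((Y.reverse.length : Int) - max (k - 1) 0)).toNat
      = Y.length - (k - 1).toNat := by
    rw [List.length_reverse]; omega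
  rw [htoNat]
  have hdrop : Y.reverse.drop (Y.length - (k - 1).toNat) = (Y.take (k - 1).toNat).reverse := by
    rw [List.reverse_take]
  rw [hdrop, List.sum_reverse]

-- ===== VERDICT (by name: the statement is the Claim_ definition above) =====
theorem solution_spec : Claim_equal_solution := by
  intro n k kids _ hpre
  unfold Spec_solution
  exact solution_eq n k kids hpre
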